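-- pv_equiv track=rewrite | github.com/MauriceelHelou/healthsystems | backend/utils/node_validation.py | find_similar_nodes
-- ===== SOURCE A (Python) =====
-- from typing import Dict, List, Set, Optional
--
-- def find_similar_nodes(node_id: str, valid_node_ids: Set[str], max_distance: int = 3) -> List[str]:
--     """
--     Find similar node IDs using simple string matching.
--
--     Args:
--         node_id: The unknown node ID
--         valid_node_ids: Set of valid node IDs
--         max_distance: Maximum edit distance for suggestions
--
--     Returns:
--         List of similar node IDs
--     """
--     suggestions = []
--
--     # Simple substring matching
--     node_parts = node_id.lower().split('_')
--
--     for valid_id in valid_node_ids: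
--         valid_parts = valid_id.lower().split('_')
--
--         # Check for common parts
--         common_parts = set(node_parts) & set(valid_parts)
--         if len(common_parts) >= len(node_parts) // 2 + 1:
--             suggestions.append(valid_id)
--
--     # Sort by similarity (more common parts first)
--     suggestions.sort(key=lambda x: -len(set(x.lower().split('_')) & set(node_parts)))
--
--     return suggestions[:5]
-- ===== SOURCE B (Python) =====
-- def find_similar_nodes(node_id, valid_node_ids, max_distance=3):
--     node_parts = node_id.lower().split('_')
--     distinct_parts = set(node_parts)
--     threshold = len(node_parts) // 2 + 1
--     # Bucket qualifying ids by overlap count (counting-sort selection, no comparison sort).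
--     buckets = {}
--     for valid_id in valid_node_ids:
--         valid_parts = set(valid_id.lower().split('_'))
--         overlap = sum(1 for p in distinct_parts if p in valid_parts)
--         if overlap >= threshold:
--             buckets.setdefault(overlap, []).append(valid_id)
--     # Overlap can never exceed the number of distinct parts, so walk counts downwards.
--     out = []
--     for cnt in range(len(distinct_parts), threshold - 1, -1):
--         out.extend(buckets.get(cnt, ()))
--     return out[:5]
-- ===== Notes on version B (the rewrite author's own statement) =====
-- stated objective: alternative
-- what changed: B replaces A's append-then-comparison-sort with a counting-sort/bucketing scheme: qualifying ids are grouped into buckets keyed by their overlap count (computed once as a membership sum over the distinct node parts), and the result is read off by walking possible counts downward from len(distinct_parts) to the threshold, then slicing to 5.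
import Mathlib
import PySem

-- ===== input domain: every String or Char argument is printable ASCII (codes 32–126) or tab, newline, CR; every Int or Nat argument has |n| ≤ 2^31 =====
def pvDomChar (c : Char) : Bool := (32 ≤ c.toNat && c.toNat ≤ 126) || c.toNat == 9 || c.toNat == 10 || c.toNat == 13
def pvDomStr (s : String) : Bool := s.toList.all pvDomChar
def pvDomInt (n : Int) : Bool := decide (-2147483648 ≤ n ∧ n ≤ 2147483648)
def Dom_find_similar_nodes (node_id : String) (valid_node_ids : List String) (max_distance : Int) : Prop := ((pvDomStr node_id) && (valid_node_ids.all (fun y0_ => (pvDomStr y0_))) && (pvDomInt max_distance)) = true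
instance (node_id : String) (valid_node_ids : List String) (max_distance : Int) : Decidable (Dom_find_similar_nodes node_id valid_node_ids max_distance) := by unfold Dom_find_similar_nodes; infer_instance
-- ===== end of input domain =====

-- B replaces A's append-then-comparison-sort with counting-sort bucketing by overlap count
-- (objective: alternative; same return value, no claim of speed).

-- s.split('_') ('_' is non-empty, so split? always returns a value)
def pySplitUnder (s : String) : List String := (PySem.Str.split? s "_").getD []

-- ===== PORT A =====
def find_similar_nodes (node_id : String) (valid_node_ids : List String) (max_distance : Int) : List String :=
  -- node_parts = node_id.lower().split('_')
  let node_parts := pySplitUnder (PySem.Str.lower node_id)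
  -- for valid_id in valid_node_ids: … if len(common) >= len(node_parts)//2 + 1: suggestions.append(valid_id)
  let suggestions := valid_node_ids.foldl (fun acc valid_id =>
    let valid_parts := pySplitUnder (PySem.Str.lower valid_id)
    let common_parts := PySem.Set.inter (PySem.Set.ofList node_parts) (PySem.Set.ofList valid_parts)
    if (common_parts.length : Int) ≥ PySem.Int.floordiv (node_parts.length : Int) 2 + 1 then
      acc ++ [valid_id]
    else acc) []
  -- suggestions.sort(key=lambda x: -len(set(x.lower().split('_')) & set(node_parts)))
  let sortedSugg := PySem.List.sorted suggestions
    (fun x => -((PySem.Set.inter (PySem.Set.ofList (pySplitUnder (PySem.Str.lower x))) (PySem.Set.ofList node_parts)).length : Int))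
  -- suggestions[:5]
  sortedSugg.take 5

-- ===== PORT B =====
def find_similar_nodes_alt (node_id : String) (valid_node_ids : List String) (max_distance : Int) : List String :=
  let node_parts := pySplitUnder (PySem.Str.lower node_id)
  let distinct_parts : PySem.Set String := PySem.Set.ofList node_parts
  let threshold := PySem.Int.floordiv (node_parts.length : Int) 2 + 1
  -- for valid_id …: overlap = sum(1 for p in distinct_parts if p in valid_parts);
  --   if overlap >= threshold: buckets.setdefault(overlap, []).append(valid_id)
  -- (the sum over the set is order-independent, so iterating distinct_parts in list order is exact)
  let buckets : PySem.Dict Int (List String) := valid_node_ids.foldl (fun d valid_id =>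
    let valid_parts : PySem.Set String := PySem.Set.ofList (pySplitUnder (PySem.Str.lower valid_id))
    let overlap : Int := ((distinct_parts.filter (fun p => PySem.Set.contains valid_parts p)).map (fun _ => (1 : Int))).sum
    if overlap ≥ threshold then d.modify overlap [] (· ++ [valid_id]) else d) PySem.Dict.empty
  -- for cnt in range(len(distinct_parts), threshold - 1, -1): out.extend(buckets.get(cnt, ()))
  let out := (PySem.List.pyRange (distinct_parts.length : Int) (threshold - 1) (-1)).foldl
    (fun acc cnt => acc ++ buckets.getD cnt []) []
  -- out[:5]
  out.take 5

-- ===== PRECONDITION & SPEC =====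
def Spec_find_similar_nodes (node_id : String) (valid_node_ids : List String) (max_distance : Int) (out : List String) : Prop := out = find_similar_nodes_alt node_id valid_node_ids max_distance
instance (node_id : String) (valid_node_ids : List String) (max_distance : Int) (out : List String) : Decidable (Spec_find_similar_nodes node_id valid_node_ids max_distance out) := by unfold Spec_find_similar_nodes; infer_instance

-- ===== CLAIM (what is proved, stated in full; the proofs are below) =====
def Claim_equal_find_similar_nodes : Prop := ∀ (node_id : String) (valid_node_ids : List String) (max_distance : Int), Dom_find_similar_nodes node_id valid_node_ids max_distance → Spec_find_similar_nodes node_id valid_node_ids max_distance (find_similar_nodes node_id valid_node_ids max_distance)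

-- ===== LEMMAS AND PROOFS =====

-- |set(a) ∩ set(b)| = |set(b) ∩ set(a)|
lemma inter_len_symm (a b : List String) :
    (PySem.Set.inter (PySem.Set.ofList a) (PySem.Set.ofList b)).length
      = (PySem.Set.inter (PySem.Set.ofList b) (PySem.Set.ofList a)).length := by
  apply List.Perm.length_eq
  rw [List.perm_ext_iff_of_nodup]
  · intro x
    simp only [PySem.Set.inter, List.mem_filter, PySem.Set.contains_iff, PySem.Set.mem_ofList]
    tauto
  · exact (PySem.Set.nodup_ofList a).filter _
  · exact (PySem.Set.nodup_ofList b).filter _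

-- insertBy goes to the very front when x sorts before every element
lemma insertBy_all_before {α : Type} (p : α → α → Bool) (x : α) (l : List α)
    (h : ∀ y ∈ l, p x y = true) : PySem.List.insertBy p x l = x :: l := by
  cases l with
  | nil => rfl
  | cons y ys => simp [PySem.List.insertBy, h y (List.mem_cons_self ..)]

-- insertBy skips a prefix x does not sort before
lemma insertBy_append_left {α : Type} (p : α → α → Bool) (x : α) (l1 l2 : List α)
    (h : ∀ y ∈ l1, p x y = false) :
    PySem.List.insertBy p x (l1 ++ l2) = l1 ++ PySem.List.insertBy p x l2 := by
  induction l1 with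
  | nil => rfl
  | cons y ys ih =>
    have hy : p x y = false := h y (List.mem_cons_self ..)
    simp only [List.cons_append, PySem.List.insertBy, hy, Bool.false_eq_true, if_false]
    rw [ih (fun z hz => h z (List.mem_cons_of_mem _ hz))]

-- inserting into a concatenation of key-homogeneous buckets (keys strictly ascending)
-- lands at the end of x's own bucket
lemma insertBy_flatMap_buckets {α : Type} (key : α → Int) (x : α) :
    ∀ (ks : List Int), ks.Pairwise (· < ·) → key x ∈ ks →
    ∀ (B : Int → List α), (∀ k ∈ ks, ∀ v ∈ B k, key v = k) →
    PySem.List.insertBy (fun a b => decide (key a < key b)) x (ks.flatMap B)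
      = ks.flatMap (fun k => B k ++ if key x = k then [x] else []) := by
  intro ks
  induction ks with
  | nil => intro _ hx; exact absurd hx (List.not_mem_nil)
  | cons k ks ih =>
    intro hpair hx B hB
    have hlt : ∀ k' ∈ ks, k < k' := fun k' hk' => List.rel_of_pairwise_cons hpair hk'
    have hpair' : ks.Pairwise (· < ·) := hpair.of_cons
    have hBk : ∀ v ∈ B k, key v = k := hB k (List.mem_cons_self ..)
    simp only [List.flatMap_cons]
    by_cases hxk : key x = k
    · -- x belongs to the head bucket: it goes after B k, before everything else
      have h1 : ∀ y ∈ B k, (decide (key x < key y)) = false := by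
        intro y hy; rw [hBk y hy, hxk]; simp
      have h2 : ∀ y ∈ ks.flatMap B, (decide (key x < key y)) = true := by
        intro y hy
        rcases List.mem_flatMap.mp hy with ⟨k', hk', hyk'⟩
        rw [hB k' (List.mem_cons_of_mem _ hk') y hyk', hxk]
        simpa using hlt k' hk'
      rw [insertBy_append_left _ _ _ _ h1, insertBy_all_before _ _ _ h2]
      have hnone : ∀ k' ∈ ks, key x ≠ k' := by
        intro k' hk' he; exact absurd (he ▸ hxk ▸ hlt k' hk') (lt_irrefl _)
      have : ks.flatMap (fun k' => B k' ++ if key x = k' then [x] else []) = ks.flatMap B := by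
        apply List.flatMap_congr
        intro a ha
        simp [hnone a ha]
      rw [this, if_pos hxk]
      simp
    · -- x belongs to a later bucket
      have hx' : key x ∈ ks := by
        rcases List.mem_cons.mp hx with h | h
        · exact absurd h hxk
        · exact h
      have h1 : ∀ y ∈ B k, (decide (key x < key y)) = false := by
        intro y hy
        rw [hBk y hy]
        simpa using le_of_lt (hlt _ hx')
      rw [insertBy_append_left _ _ _ _ h1,
        ih hpair' hx' B (fun k' hk' => hB k' (List.mem_cons_of_mem _ hk'))]
      rw [if_neg hxk]
      simp

-- a stable ascending sort is the concatenation of the key buckets, keys ascending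
lemma sorted_buckets {α : Type} (key : α → Int) (ks : List Int) (hks : ks.Pairwise (· < ·)) :
    ∀ xs : List α, (∀ v ∈ xs, key v ∈ ks) →
    PySem.List.sorted xs key = ks.flatMap (fun k => xs.filter (fun v => key v == k)) := by
  intro xs
  induction xs using List.reverseRecOn with
  | nil => simp [PySem.List.sorted_eq_foldl_insertBy]
  | append_singleton xs x ih =>
    intro hmem
    have hxs : ∀ v ∈ xs, key v ∈ ks := fun v hv => hmem v (List.mem_append_left _ hv)
    rw [PySem.List.sorted_eq_foldl_insertBy, List.foldl_append, List.foldl_cons, List.foldl_nil,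
      ← PySem.List.sorted_eq_foldl_insertBy, ih hxs,
      insertBy_flatMap_buckets key x ks hks (hmem x (by simp)) _
        (fun k _ v hv => by simpa using (List.of_mem_filter hv))]
    apply List.flatMap_congr
    intro k hk
    simp only [List.filter_append, List.filter_cons, List.filter_nil]
    by_cases h : key x = k
    · simp [h]
    · simp [h]

-- proof-only abbreviations: the shared overlap count, threshold and count ceiling
def fsnC (node_id v : String) : Int :=
  ((PySem.Set.inter (PySem.Set.ofList (pySplitUnder (PySem.Str.lower node_id)))
    (PySem.Set.ofList (pySplitUnder (PySem.Str.lower v)))).length : Int)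

def fsnTh (node_id : String) : Int :=
  PySem.Int.floordiv (((pySplitUnder (PySem.Str.lower node_id)).length : Int)) 2 + 1

def fsnK (node_id : String) : Int :=
  ((PySem.Set.ofList (pySplitUnder (PySem.Str.lower node_id))).length : Int)

-- the common normal form of both ports: survivors bucketed by count, counts descending, first 5
def fsnCanon (node_id : String) (L : List String) : List String :=
  ((PySem.List.pyRange (fsnK node_id) (fsnTh node_id - 1) (-1)).flatMap
    (fun k => (L.filter (fun v => decide (fsnC node_id v ≥ fsnTh node_id))).filter
      (fun v => fsnC node_id v == k))).take 5

lemma fsnC_le_K (node_id v : String) : fsnC node_id v ≤ fsnK node_id := by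
  unfold fsnC fsnK
  exact_mod_cast List.length_filter_le _ _

lemma fsn_ks_pairwise (node_id : String) :
    ((PySem.List.pyRange (fsnK node_id) (fsnTh node_id - 1) (-1)).map (fun k => -k)).Pairwise (· < ·) := by
  rw [PySem.List.pyRange_neg_one, List.map_map]
  rw [List.pairwise_map]
  exact List.pairwise_lt_range.imp (by intro a b h; simp only [Function.comp]; omega)

set_option maxHeartbeats 1000000 in
lemma A_eq (node_id : String) (L : List String) (md : Int) :
    find_similar_nodes node_id L md = fsnCanon node_id L := by
  unfold find_similar_nodes
  show (PySem.List.sorted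
      (L.foldl (fun acc v => if fsnC node_id v ≥ fsnTh node_id then acc ++ [v] else acc) [])
      (fun x => -((PySem.Set.inter (PySem.Set.ofList (pySplitUnder (PySem.Str.lower x)))
        (PySem.Set.ofList (pySplitUnder (PySem.Str.lower node_id)))).length : Int))).take 5
    = fsnCanon node_id L
  have hkey : (fun x => -((PySem.Set.inter (PySem.Set.ofList (pySplitUnder (PySem.Str.lower x)))
        (PySem.Set.ofList (pySplitUnder (PySem.Str.lower node_id)))).length : Int))
      = fun x => -(fsnC node_id x) := by
    funext x
    unfold fsnC
    rw [inter_len_symm]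
  rw [hkey, PySem.List.foldl_append_ite_eq_filter (p := fun v => fsnC node_id v ≥ fsnTh node_id),
    List.nil_append]
  rw [sorted_buckets (fun x => -(fsnC node_id x))
    ((PySem.List.pyRange (fsnK node_id) (fsnTh node_id - 1) (-1)).map (fun k => -k))
    (fsn_ks_pairwise node_id)
    (L.filter (fun v => decide (fsnC node_id v ≥ fsnTh node_id))) ?mem]
  · unfold fsnCanon
    rw [List.flatMap_map]
    refine congrArg (List.take 5) ?_
    apply List.flatMap_congr
    intro k _
    apply List.filter_congr
    intro v _
    by_cases h : fsnC node_id v = k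
    · simp [h]
    · have h1 : (fsnC node_id v == k) = false := by simpa using h
      have h2 : (-(fsnC node_id v) == -k) = false := by
        simp only [beq_eq_false_iff_ne, ne_eq, neg_inj]
        exact h
      rw [h1, h2]
  · intro v hv
    have hge : fsnC node_id v ≥ fsnTh node_id := by
      have := List.of_mem_filter hv
      simpa using this
    simp only [List.mem_map]
    refine ⟨fsnC node_id v, ?_, rfl⟩
    rw [PySem.List.mem_pyRange_neg_one]
    exact ⟨by omega, fsnC_le_K node_id v⟩

set_option maxHeartbeats 1000000 in
lemma B_eq (node_id : String) (L : List String) (md : Int) :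
    find_similar_nodes_alt node_id L md = fsnCanon node_id L := by
  unfold find_similar_nodes_alt
  show ((PySem.List.pyRange (fsnK node_id) (fsnTh node_id - 1) (-1)).foldl
      (fun acc cnt => acc ++ (L.foldl (fun d valid_id =>
        let valid_parts : PySem.Set String := PySem.Set.ofList (pySplitUnder (PySem.Str.lower valid_id))
        let overlap : Int := (((PySem.Set.ofList (pySplitUnder (PySem.Str.lower node_id))).filter
          (fun p => PySem.Set.contains valid_parts p)).map (fun _ => (1 : Int))).sum
        if overlap ≥ fsnTh node_id then d.modify overlap [] (· ++ [valid_id]) else d)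
        PySem.Dict.empty).getD cnt []) []).take 5
    = fsnCanon node_id L
  have hbuckets : (L.foldl (fun d valid_id =>
        let valid_parts : PySem.Set String := PySem.Set.ofList (pySplitUnder (PySem.Str.lower valid_id))
        let overlap : Int := (((PySem.Set.ofList (pySplitUnder (PySem.Str.lower node_id))).filter
          (fun p => PySem.Set.contains valid_parts p)).map (fun _ => (1 : Int))).sum
        if overlap ≥ fsnTh node_id then d.modify overlap [] (· ++ [valid_id]) else d)
        PySem.Dict.empty)
      = (L.filter (fun v => decide (fsnC node_id v ≥ fsnTh node_id))).foldl
          (fun d v => d.modify (fsnC node_id v) [] (· ++ [v])) PySem.Dict.empty := by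
    have h1 : (L.foldl (fun d valid_id =>
        let valid_parts : PySem.Set String := PySem.Set.ofList (pySplitUnder (PySem.Str.lower valid_id))
        let overlap : Int := (((PySem.Set.ofList (pySplitUnder (PySem.Str.lower node_id))).filter
          (fun p => PySem.Set.contains valid_parts p)).map (fun _ => (1 : Int))).sum
        if overlap ≥ fsnTh node_id then d.modify overlap [] (· ++ [valid_id]) else d)
        PySem.Dict.empty)
        = L.foldl (fun d v => if fsnC node_id v ≥ fsnTh node_id
            then d.modify (fsnC node_id v) [] (· ++ [v]) else d) PySem.Dict.empty := by
      apply PySem.List.foldl_congr_mem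
      intro d v _
      have hov : (((PySem.Set.ofList (pySplitUnder (PySem.Str.lower node_id))).filter
          (fun p => PySem.Set.contains (PySem.Set.ofList (pySplitUnder (PySem.Str.lower v))) p)).map
          (fun _ => (1 : Int))).sum = fsnC node_id v := by
        rw [PySem.List.sum_map_const_int, mul_one]
        rfl
      simp only [hov]
    rw [h1]
    exact PySem.List.foldl_ite_eq_foldl_filter (fun v => fsnC node_id v ≥ fsnTh node_id)
      (fun d v => d.modify (fsnC node_id v) [] (· ++ [v])) L PySem.Dict.empty
  have hget : ∀ k : Int,
      ((L.filter (fun v => decide (fsnC node_id v ≥ fsnTh node_id))).foldl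
        (fun d v => d.modify (fsnC node_id v) [] (· ++ [v])) PySem.Dict.empty).getD k []
      = (L.filter (fun v => decide (fsnC node_id v ≥ fsnTh node_id))).filter
          (fun v => fsnC node_id v == k) := by
    intro k
    have h := PySem.Dict.getD_foldl_modify_append
      ((L.filter (fun v => decide (fsnC node_id v ≥ fsnTh node_id))).map
        (fun v => (fsnC node_id v, v)))
      (PySem.Dict.empty (κ := Int) (ν := List String)) k
    rw [List.foldl_map] at h
    simp only [PySem.Dict.getD_empty, List.nil_append, List.filter_map, List.map_map] at h
    rw [h]
    have hid : ((fun x : Int × String => x.2) ∘ fun v => (fsnC node_id v, v)) = id := rfl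
    have hp : ((fun p : Int × String => p.1 == k) ∘ fun v => (fsnC node_id v, v))
        = fun v => fsnC node_id v == k := rfl
    rw [hid, hp, List.map_id]
  have hout : (PySem.List.pyRange (fsnK node_id) (fsnTh node_id - 1) (-1)).foldl
      (fun acc cnt => acc ++ ((L.filter (fun v => decide (fsnC node_id v ≥ fsnTh node_id))).foldl
        (fun d v => d.modify (fsnC node_id v) [] (· ++ [v])) PySem.Dict.empty).getD cnt []) []
      = (PySem.List.pyRange (fsnK node_id) (fsnTh node_id - 1) (-1)).foldl
      (fun acc cnt => acc ++ (L.filter (fun v => decide (fsnC node_id v ≥ fsnTh node_id))).filter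
          (fun v => fsnC node_id v == cnt)) [] := by
    apply PySem.List.foldl_congr_mem
    intro acc cnt _
    rw [hget cnt]
  rw [hbuckets, hout, PySem.List.foldl_append_eq_flatMap, List.nil_append]
  rfl

-- ===== VERDICT (by name: the statement is the Claim_ definition above) =====
theorem find_similar_nodes_spec : Claim_equal_find_similar_nodes := by
  intro node_id valid_node_ids max_distance _
  unfold Spec_find_similar_nodes
  rw [A_eq, B_eq]
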